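-- pv_equiv track=rewrite | github.com/ByeonSeungHa/Python | cospro/k번째로 작은 수.py | solution
-- ===== SOURCE A (Python) =====
-- def solution(arr, k):
--     answer = 0
--     s = []
--     for i in arr:
--         for j in i:
--             s.append(j)
--     answer = sorted(s)
--     answer = answer[k-1]
--     return answer
-- ===== SOURCE B (Python) =====
-- def solution(arr, k):
--     s = [x for row in arr for x in row]
--     return _select(s, k - 1)
--
--
-- def _select(lst, i):
--     # iterative quickselect: i-th smallest (0-based) of lst; IndexError on empty list
--     while True:
--         pivot = lst[0]
--         less = [x for x in lst if x < pivot]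
--         if i < len(less):
--             lst = less
--             continue
--         n_le = len(less) + len([x for x in lst if x == pivot])
--         if i < n_le:
--             return pivot
--         lst = [x for x in lst if x > pivot]
--         i -= n_le
-- ===== Notes on version B (the rewrite author's own statement) =====
-- stated objective: alternative
-- what changed: replaces flatten-then-full-sort-then-index with an iterative three-way-partition quickselect that finds the (k-1)-th smallest directly without ever sorting
-- outside the precondition, e.g. on solution([[1, 2]], 0): A returns 2, B raises IndexError; on solution([[3, 1]], -1): A returns 1, B raises IndexError
import Mathlib
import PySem

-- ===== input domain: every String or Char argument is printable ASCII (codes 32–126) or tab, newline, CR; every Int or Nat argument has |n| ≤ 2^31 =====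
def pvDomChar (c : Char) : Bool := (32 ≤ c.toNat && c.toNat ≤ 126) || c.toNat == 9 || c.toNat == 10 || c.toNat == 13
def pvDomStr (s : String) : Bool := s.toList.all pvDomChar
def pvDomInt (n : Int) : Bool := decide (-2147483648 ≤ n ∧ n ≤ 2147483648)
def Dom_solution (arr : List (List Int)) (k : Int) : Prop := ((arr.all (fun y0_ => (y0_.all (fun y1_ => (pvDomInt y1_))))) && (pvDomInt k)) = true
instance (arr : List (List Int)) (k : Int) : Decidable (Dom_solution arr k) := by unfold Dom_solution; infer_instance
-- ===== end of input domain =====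

-- B replaces flatten + full sort + index by a three-way-partition quickselect (alternative algorithm, same return value on Pre_).

-- ===== PORT A =====
-- s = []; for i in arr: for j in i: s.append(j); answer = sorted(s); answer = answer[k-1]
def solution (arr : List (List Int)) (k : Int) : Int :=
  let s := arr.foldl (fun s i => i.foldl (fun s j => s ++ [j]) s) []
  let answer := PySem.List.sorted s (fun x => x) false
  PySem.List.pyGetD answer (k - 1) 0

-- ===== PORT B =====
-- quickselect helper _select from Source B; Python raises IndexError on [] (outside Pre_), the port returns 0 there
def pvSelect : List Int → Int → Int
  | [], _ => 0
  | pivot :: rest, i =>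
    let lst := pivot :: rest
    let less := lst.filter (fun x => decide (x < pivot))
    if i < (less.length : Int) then pvSelect less i
    else
      let nle : Int := (less.length : Int) + ((lst.filter (fun x => decide (x = pivot))).length : Int)
      if i < nle then pivot
      else pvSelect (lst.filter (fun x => decide (pivot < x))) (i - nle)
termination_by lst _ => lst.length
decreasing_by
  · exact List.length_filter_lt_length_iff_exists.2 ⟨pivot, by simp, by simp⟩
  · exact List.length_filter_lt_length_iff_exists.2 ⟨pivot, by simp, by simp⟩

def solution_alt (arr : List (List Int)) (k : Int) : Int :=
  let s := arr.flatMap (fun row => row)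
  pvSelect s (k - 1)

-- ===== PRECONDITION & SPEC =====
-- Pre_ excludes the inputs where Python A raises IndexError (k-1 ≥ n) and the k ≤ 0 inputs where A
-- returns via Python's accidental negative-index wraparound: on all of those B's quickselect naturally raises IndexError.
def Pre_solution (arr : List (List Int)) (k : Int) : Prop :=
  1 ≤ k ∧ k ≤ ((arr.map List.length).sum : Int)
instance (arr : List (List Int)) (k : Int) : Decidable (Pre_solution arr k) := by unfold Pre_solution; infer_instance
def pvWitness_solution : List (List Int) × Int := ([[3, 1], [2]], 2)

def Spec_solution (arr : List (List Int)) (k : Int) (out : Int) : Prop := out = solution_alt arr k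
instance (arr : List (List Int)) (k : Int) (out : Int) : Decidable (Spec_solution arr k out) := by unfold Spec_solution; infer_instance

-- ===== CLAIM (what is proved, stated in full; the proofs are below) =====
def Claim_equal_solution : Prop := ∀ (arr : List (List Int)) (k : Int), Dom_solution arr k → Pre_solution arr k → Spec_solution arr k (solution arr k)

-- ===== LEMMAS AND PROOFS =====

-- A's nested append loops build exactly the flattening
theorem pvInnerFlatten (i : List Int) : ∀ s : List Int, i.foldl (fun s j => s ++ [j]) s = s ++ i := by
  induction i with
  | nil => intro s; simp
  | cons a t ih => intro s; rw [List.foldl_cons, ih]; simp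

theorem pvFlattenEq (arr : List (List Int)) : ∀ acc : List Int,
    arr.foldl (fun s i => i.foldl (fun s j => s ++ [j]) s) acc = acc ++ arr.flatMap (fun row => row) := by
  induction arr with
  | nil => intro acc; simp
  | cons a t ih => intro acc; rw [List.foldl_cons, pvInnerFlatten a acc, ih]; simp

-- three-way partition is a permutation of the list
theorem pvPerm3 (p : Int) : ∀ l : List Int,
    (l.filter (fun x => decide (x < p)) ++ l.filter (fun x => decide (x = p)) ++ l.filter (fun x => decide (p < x))).Perm l := by
  intro l
  induction l with
  | nil => simp
  | cons a t ih =>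
    rcases lt_trichotomy a p with h | h | h
    · simp only [List.filter_cons]
      rw [if_pos (by simpa using h), if_neg (by simp [ne_of_lt h]), if_neg (by simp [not_lt.2 h.le])]
      simpa using ih.cons a
    · subst h
      simp only [List.filter_cons]
      rw [if_neg (by simp), if_pos (by simp), if_neg (by simp)]
      have e : t.filter (fun x => decide (x < a)) ++ (a :: t.filter (fun x => decide (x = a))) ++ t.filter (fun x => decide (a < x))
          = t.filter (fun x => decide (x < a)) ++ a :: (t.filter (fun x => decide (x = a)) ++ t.filter (fun x => decide (a < x))) := by
        simp
      rw [e]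
      exact List.perm_middle.trans (List.Perm.cons a (by simpa [List.append_assoc] using ih))
    · simp only [List.filter_cons]
      rw [if_neg (by simp [not_lt.2 h.le]), if_neg (by simp [ne_of_gt h]), if_pos (by simpa using h)]
      exact List.perm_middle.trans (List.Perm.cons a ih)

-- sorted of a list splits as sorted(less) ++ equal ++ sorted(greater)
theorem pvSortedSplit (p : Int) (l : List Int) :
    PySem.List.sorted l (fun x => x) false =
      PySem.List.sorted (l.filter (fun x => decide (x < p))) (fun x => x) false
      ++ l.filter (fun x => decide (x = p))
      ++ PySem.List.sorted (l.filter (fun x => decide (p < x))) (fun x => x) false := by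
  apply PySem.List.sorted_id_eq_of_perm_of_pairwise
  · exact (((PySem.List.sorted_perm _ _ _).append (List.Perm.refl _)).append
      (PySem.List.sorted_perm _ _ _)).trans (pvPerm3 p l)
  · have hL : ∀ x ∈ PySem.List.sorted (l.filter (fun x => decide (x < p))) (fun x => x) false, x < p := by
      intro x hx
      simpa using List.of_mem_filter ((PySem.List.mem_sorted _ _ _ _).1 hx)
    have hE : ∀ x ∈ l.filter (fun x => decide (x = p)), x = p := by
      intro x hx; simpa using List.of_mem_filter hx
    have hG : ∀ x ∈ PySem.List.sorted (l.filter (fun x => decide (p < x))) (fun x => x) false, p < x := by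
      intro x hx
      simpa using List.of_mem_filter ((PySem.List.mem_sorted _ _ _ _).1 hx)
    rw [List.append_assoc, List.pairwise_append]
    refine ⟨PySem.List.sorted_pairwise _ _, ?_, ?_⟩
    · rw [List.pairwise_append]
      refine ⟨List.pairwise_of_forall_mem_list (fun a ha b hb => le_of_eq ((hE a ha).trans (hE b hb).symm)),
        PySem.List.sorted_pairwise _ _, fun a ha b hb => le_of_lt ((hE a ha) ▸ hG b hb)⟩
    · intro a ha b hb
      rcases List.mem_append.1 hb with hb | hb
      · exact le_of_lt ((hE b hb) ▸ hL a ha)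
      · exact le_of_lt (lt_trans (hL a ha) (hG b hb))

-- quickselect returns the i-th element of the sorted flattening
theorem pvSelect_eq_sorted : ∀ (n : Nat) (l : List Int), l.length ≤ n → ∀ i : Int, 0 ≤ i → i < (l.length : Int) →
    pvSelect l i = PySem.List.pyGetD (PySem.List.sorted l (fun x => x) false) i 0 := by
  intro n
  induction n with
  | zero => intro l hl i h0 h1; omega
  | succ n ih =>
    intro l hl i h0 h1
    match l with
    | [] => simp at h1; omega
    | pivot :: rest =>
      set l := pivot :: rest with hldef
      set L := l.filter (fun x => decide (x < pivot)) with hLdef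
      set E := l.filter (fun x => decide (x = pivot)) with hEdef
      set G := l.filter (fun x => decide (pivot < x)) with hGdef
      have hlen : L.length + (E.length + G.length) = l.length := by
        rw [hLdef, hEdef, hGdef]
        simpa using (pvPerm3 pivot l).length_eq
      have hLlt : L.length < l.length := by
        rw [hLdef]
        exact List.length_filter_lt_length_iff_exists.2 ⟨pivot, by simp [hldef], by simp⟩
      have hGlt : G.length < l.length := by
        rw [hGdef]
        exact List.length_filter_lt_length_iff_exists.2 ⟨pivot, by simp [hldef], by simp⟩
      have hsplit : PySem.List.sorted l (fun x => x) false
          = PySem.List.sorted L (fun x => x) false ++ E ++ PySem.List.sorted G (fun x => x) false := by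
        rw [hLdef, hEdef, hGdef]
        exact pvSortedSplit pivot l
      have hsA : (PySem.List.sorted L (fun x => x) false).length = L.length := PySem.List.length_sorted _ _ _
      have hsG : (PySem.List.sorted G (fun x => x) false).length = G.length := PySem.List.length_sorted _ _ _
      rw [show pvSelect l i =
          (if i < (L.length : Int) then pvSelect L i
           else if i < (L.length : Int) + (E.length : Int) then pivot
           else pvSelect G (i - ((L.length : Int) + (E.length : Int)))) from by
        rw [hldef]; rw [pvSelect]]
      rw [hsplit, PySem.List.pyGetD_eq_getElem _ _ h0 (by
        rw [List.length_append, List.length_append, hsA, hsG]; omega)]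
      split_ifs with c1 c2
      · -- i < |L| : recurse on the less-than part
        rw [List.getElem_append_left (by rw [List.length_append]; omega),
          List.getElem_append_left (by omega)]
        rw [ih L (by omega) i h0 (by omega),
          PySem.List.pyGetD_eq_getElem _ _ h0 (by omega)]
      · -- |L| ≤ i < |L| + |E| : the answer is the pivot
        rw [List.getElem_append_left (by rw [List.length_append]; omega),
          List.getElem_append_right (by omega)]
        have hmem : E[i.toNat - (PySem.List.sorted L (fun x => x) false).length]'(by omega) ∈ E :=
          List.getElem_mem _
        have hall : ∀ x ∈ E, x = pivot := by
          rw [hEdef]; intro x hx; simpa using List.of_mem_filter hx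
        exact (hall _ hmem).symm
      · -- the greater part
        rw [List.getElem_append_right (by rw [List.length_append]; omega)]
        rw [ih G (by omega) (i - ((L.length : Int) + (E.length : Int))) (by omega) (by omega)]
        rw [PySem.List.pyGetD_eq_getElem _ _ (by omega) (by omega)]
        congr 1
        rw [List.length_append]
        omega

-- ===== VERDICT (by name: the statement is the Claim_ definition above) =====
theorem solution_spec : Claim_equal_solution := by
  intro arr k _ hpre
  obtain ⟨hk1, hk2⟩ := hpre
  unfold Spec_solution solution solution_alt
  have hflat : arr.foldl (fun s i => i.foldl (fun s j => s ++ [j]) s) [] = arr.flatMap (fun row => row) := by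
    simpa using pvFlattenEq arr []
  have hlen : ((arr.flatMap (fun row => row)).length : Int) = ((arr.map List.length).sum : Int) := by
    simp
  rw [hflat]
  exact (pvSelect_eq_sorted (arr.flatMap (fun row => row)).length _ le_rfl (k - 1) (by omega) (by omega)).symm
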